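-- pv_equiv track=rewrite | github.com/Sara-Alkhateeb/DSAA--OLD | cc2/ArrayInsertShift.py | newArr
-- ===== SOURCE A (Python) =====
-- def newArr(arr, val):
--     n = len(arr)
--     if n == 0:
--         return [val]
--
--     mid = n // 2
--     if mid >= n:
--         mid = n - 1
--
--     # shift the elements to the right of the midpoint
--     for i in range(n-1, mid, -1):
--         arr[i] = arr[i-1]
--
--     # insert the new value into the ( midpoint )
--     arr[mid] = val
--
--     return arr
-- ===== SOURCE B (Python) =====
-- def newArr(arr, val):
--     if not arr:
--         return [val]
--     n = len(arr)
--     mid = n // 2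
--     arr[:] = arr[:mid] + [val] + arr[mid:n-1]
--     return arr
-- ===== Notes on version B (the rewrite author's own statement) =====
-- stated objective: simpler
-- what changed: The element-by-element reverse shift loop plus two index assignments is replaced by one slice concatenation arr[:mid] + [val] + arr[mid:n-1] written back in place.
import Mathlib
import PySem

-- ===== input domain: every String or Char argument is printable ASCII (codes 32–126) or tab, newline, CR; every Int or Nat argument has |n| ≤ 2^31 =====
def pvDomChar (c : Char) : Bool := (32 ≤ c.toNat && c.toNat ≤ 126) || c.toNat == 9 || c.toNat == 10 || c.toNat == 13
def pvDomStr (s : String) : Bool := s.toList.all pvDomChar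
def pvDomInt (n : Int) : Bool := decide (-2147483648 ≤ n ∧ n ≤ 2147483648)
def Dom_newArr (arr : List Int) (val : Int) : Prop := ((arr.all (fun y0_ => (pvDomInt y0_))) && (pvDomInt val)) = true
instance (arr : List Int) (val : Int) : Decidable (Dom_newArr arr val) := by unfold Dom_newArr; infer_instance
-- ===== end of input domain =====

-- B replaces A's element-by-element reverse shift loop by one slice concatenation written back in
-- place (objective: simpler). Both A and B mutate the argument list in Python; the equivalence
-- proved here is about the RETURN value.

-- ===== PORT A =====
-- 'for i in range(n-1, mid, -1): arr[i] = arr[i-1]' as a downward structural recursion;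
-- indices are always in range here, so arr[i-1] is ported as pyGetD with default 0 (never used).
def shiftLoop (a : List Int) (mid i : Int) : List Int :=
  if h : mid < i then
    shiftLoop (a.set i.toNat (PySem.List.pyGetD a (i - 1) 0)) mid (i - 1)
  else a
termination_by (i - mid).toNat
decreasing_by omega

def newArr (arr : List Int) (val : Int) : List Int :=
  let n : Int := arr.length
  if n = 0 then [val]
  else
    let mid := PySem.Int.floordiv n 2
    let mid := if mid ≥ n then n - 1 else mid
    let arr := shiftLoop arr mid (n - 1)
    arr.set mid.toNat val

-- ===== PORT B =====
def newArr_alt (arr : List Int) (val : Int) : List Int :=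
  if arr = [] then [val]
  else
    let n : Int := arr.length
    let mid := PySem.Int.floordiv n 2
    PySem.List.slice arr none (some mid) ++ [val] ++ PySem.List.slice arr (some mid) (some (n - 1))

-- ===== PRECONDITION & SPEC =====
def Spec_newArr (arr : List Int) (val : Int) (out : List Int) : Prop := out = newArr_alt arr val
instance (arr : List Int) (val : Int) (out : List Int) : Decidable (Spec_newArr arr val out) := by unfold Spec_newArr; infer_instance

-- ===== CLAIM (what is proved, stated in full; the proofs are below) =====
def Claim_equal_newArr : Prop := ∀ (arr : List Int) (val : Int), Dom_newArr arr val → Spec_newArr arr val (newArr arr val)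


-- ===== LEMMAS AND PROOFS =====

-- The shift loop moves each element in positions (m, i] one slot to the right (duplicating the
-- element at position m into position m+1's source); characterised by take/drop segments.
theorem shiftLoop_eq (a : List Int) (m i : Nat) (hmi : m ≤ i) (hi : i < a.length) :
    shiftLoop a (m : Int) (i : Int) =
      a.take (m + 1) ++ (a.drop m).take (i - m) ++ a.drop (i + 1) := by
  induction i generalizing a with
  | zero =>
    have hm : m = 0 := Nat.le_zero.mp hmi
    subst hm
    rw [shiftLoop]
    rw [dif_neg (by omega)]
    have := List.take_append_drop 1 a
    simpa using this.symm
  | succ k ih =>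
    by_cases hm : m = k + 1
    · subst hm
      rw [shiftLoop]
      rw [dif_neg (by omega)]
      have := List.take_append_drop (k + 1 + 1) a
      simpa using this.symm
    · have hmk : m ≤ k := by omega
      have hk : k < a.length := by omega
      rw [shiftLoop]
      rw [dif_pos (by push_cast; omega)]
      have hcast1 : ((k : Int) + 1) - 1 = (k : Int) := by ring
      have hidx : (((k + 1 : Nat) : Int)).toNat = k + 1 := by omega
      have hget : PySem.List.pyGetD a (((k + 1 : Nat) : Int) - 1) 0 = a[k] := by
        push_cast
        rw [hcast1, PySem.List.pyGetD_natCast]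
        exact List.getD_eq_getElem a 0 hk
      set a' : List Int := a.set (k + 1) a[k] with ha'
      have step : a.set (((k + 1 : Nat) : Int)).toNat (PySem.List.pyGetD a (((k + 1 : Nat) : Int) - 1) 0) = a' := by
        rw [hidx, hget]
      have hcast2 : ((k + 1 : Nat) : Int) - 1 = ((k : Nat) : Int) := by push_cast; ring
      rw [step, hcast2, ih a' hmk (by simp [ha', hk])]
      -- now rewrite each segment of a' back to segments of a
      have h1 : a'.take (m + 1) = a.take (m + 1) := by
        rw [ha', List.take_set]
        exact List.set_eq_of_length_le (by simp; omega)
      have h2 : (a'.drop m).take (k - m) = (a.drop m).take (k - m) := by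
        rw [ha', List.drop_set, if_neg (by omega), List.take_set]
        exact List.set_eq_of_length_le (by simp; omega)
      have h3 : a'.drop (k + 1) = a[k] :: a.drop (k + 1 + 1) := by
        rw [ha', List.drop_set, if_neg (by omega), Nat.sub_self,
            List.drop_eq_getElem_cons hi, List.set_cons_zero]
      have h4 : (a.drop m).take (k + 1 - m) = (a.drop m).take (k - m) ++ [a[k]] := by
        have hlt : k - m < (a.drop m).length := by simp; omega
        have : k + 1 - m = (k - m) + 1 := by omega
        rw [this, List.take_succ_eq_append_getElem hlt, List.getElem_drop]
        simp only [show m + (k - m) = k from by omega]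
      rw [h1, h2, h3, h4]
      simp

-- ===== VERDICT (by name: the statement is the Claim_ definition above) =====
theorem newArr_spec : Claim_equal_newArr := by
  unfold Claim_equal_newArr Spec_newArr newArr newArr_alt
  intro arr val _
  rcases h : arr with _ | ⟨x, xs⟩
  · simp
  · rw [← h]
    have hne : arr ≠ [] := by simp [h]
    have hlen : 1 ≤ arr.length := by rw [h]; simp
    simp only [if_neg (show ¬((arr.length : Int) = 0) by omega), if_neg hne]
    set n : Nat := arr.length with hn
    have hfd : PySem.Int.floordiv (n : Int) 2 = ((n / 2 : Nat) : Int) := by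
      rw [PySem.Int.floordiv_eq_ediv_of_pos (by omega)]
      exact (Int.natCast_div n 2).symm
    set m : Nat := n / 2 with hm
    have hmlt : m < n := by omega
    rw [hfd]
    rw [if_neg (by omega)]
    have hcast : ((n : Int) - 1) = ((n - 1 : Nat) : Int) := by omega
    rw [hcast, shiftLoop_eq arr m (n - 1) (by omega) (by omega)]
    rw [PySem.List.slice_to arr (show (0:Int) ≤ (m : Int) by omega),
        PySem.List.slice_toNat arr (show (0:Int) ≤ (m : Int) by omega) (show (0:Int) ≤ ((n - 1 : Nat) : Int) by omega)]
    simp only [Int.toNat_natCast]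
    rw [show arr.drop (n - 1 + 1) = [] by apply List.drop_eq_nil_of_le; omega]
    rw [List.append_nil, List.set_append, if_pos (by simp; omega)]
    rw [List.take_succ_eq_append_getElem (by omega : m < arr.length)]
    rw [List.set_append, if_neg (by simp only [List.length_take]; omega)]
    simp [show min m arr.length = m from by omega]
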